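-- pv_equiv track=rewrite | github.com/burmeisterryan3/dsa | src/arrays_and_strings/p1208.py | equal_substring_speed
-- ===== SOURCE A (Python) =====
-- def equal_substring_speed(s:str, t:str, max_cost:int) -> int:
--     left = max_length = running_cost = 0
--     all_costs = [abs(ord(s[i]) - ord(t[i])) for i in range(len(t))]
--
--     for right in range(len(s)):
--         running_cost += all_costs[right]
--         while running_cost > max_cost:
--             running_cost -= all_costs[left]
--             left += 1
--
--         max_length = max(right-left+1, max_length)
--     return max_length
-- ===== SOURCE B (Python) =====
-- def equal_substring_speed(s: str, t: str, max_cost: int) -> int: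
--     # prefix[i] = total cost of the first i positions
--     prefix = [0]
--     acc = 0
--     for i in range(len(t)):
--         acc += abs(ord(s[i]) - ord(t[i]))
--         prefix.append(acc)
--
--     best = 0
--     for right in range(len(s)):
--         # smallest left with prefix[left] >= prefix[right+1] - max_cost
--         need = prefix[right + 1] - max_cost
--         lo, hi = 0, len(prefix)
--         while lo < hi:
--             mid = (lo + hi) // 2
--             if prefix[mid] < need:
--                 lo = mid + 1
--             else:
--                 hi = mid
--         best = max(best, right + 1 - lo)
--     return best
-- ===== Notes on version B (the rewrite author's own statement) =====
-- stated objective: alternative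
-- what changed: B replaces A's amortised two-pointer while-loop drain by a prefix-sum table built once and a hand-written bisect_left binary search over it for each right end.
import Mathlib
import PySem

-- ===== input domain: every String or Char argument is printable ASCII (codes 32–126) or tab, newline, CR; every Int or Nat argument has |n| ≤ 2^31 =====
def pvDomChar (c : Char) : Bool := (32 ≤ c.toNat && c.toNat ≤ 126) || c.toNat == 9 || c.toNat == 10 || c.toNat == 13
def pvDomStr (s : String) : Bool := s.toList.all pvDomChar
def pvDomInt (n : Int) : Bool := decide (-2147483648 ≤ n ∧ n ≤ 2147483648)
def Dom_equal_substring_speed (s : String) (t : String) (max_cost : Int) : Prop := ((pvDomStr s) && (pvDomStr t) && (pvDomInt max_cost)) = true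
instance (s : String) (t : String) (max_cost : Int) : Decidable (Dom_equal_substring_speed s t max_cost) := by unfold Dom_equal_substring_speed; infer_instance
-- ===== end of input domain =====

-- B replaces A's amortised two-pointer window drain by a prefix-sum table queried with a
-- hand-written binary search per right end (alternative algorithm, similar cost).
-- A raises IndexError whenever len(s) ≠ len(t) or (s nonempty and max_cost < 0); Pre_ excludes exactly those.

-- ===== PORT A =====
-- |ord(s[i]) - ord(t[i])| ; exact for i < len(s), i < len(t); the default ' ' stands for
-- Python's IndexError on s[i] (reached only outside Pre_equal_substring_speed).
def pvCostAt (s t : List Char) (i : Nat) : Int :=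
  |((s[i]?.getD ' ').toNat : Int) - ((t[i]?.getD ' ').toNat : Int)|

-- the `while running_cost > max_cost` drain; cs[left]? = none is Python's IndexError
-- (reached only outside Pre_equal_substring_speed, where the junk value (left, rc) is returned).
-- fuel is only a structural-recursion bound: it exceeds the possible number of iterations at
-- every call site (pvDrain_spec shows it is never exhausted inside Pre_equal_substring_speed)
def pvDrain (mc : Int) (cs : List Int) : Nat → Nat → Int → Nat × Int
  | 0, left, rc => (left, rc)
  | fuel + 1, left, rc =>
    if rc > mc then
      match cs[left]? with
      | some c => pvDrain mc cs fuel (left + 1) (rc - c)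
      | none => (left, rc)
    else (left, rc)

def equal_substring_speed (s : String) (t : String) (max_cost : Int) : Int :=
  let cs := (List.range t.toList.length).map (pvCostAt s.toList t.toList)
  ((List.range s.toList.length).foldl
    (fun (st : Nat × Int × Int) right =>
      let rc := st.2.2 + cs.getD right 0
      let p := pvDrain max_cost cs (cs.length + 1) st.1 rc
      (p.1, max ((right : Int) - (p.1 : Int) + 1) st.2.1, p.2))
    (0, 0, 0)).2.1

-- ===== PORT B =====
-- the hand-written bisect_left loop of Source B; (lo+hi)//2 on nonnegative ints = Nat division.
-- fuel is only a structural-recursion bound: hi - lo shrinks every iteration, so the initial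
-- fuel P.length + 1 passed below is never exhausted (pvBisect_spec)
def pvBisect (P : List Int) (need : Int) : Nat → Nat → Nat → Nat
  | 0, lo, _ => lo
  | fuel + 1, lo, hi =>
    if lo < hi then
      let mid := (lo + hi) / 2
      if P.getD mid 0 < need then pvBisect P need fuel (mid + 1) hi
      else pvBisect P need fuel lo mid
    else lo

def equal_substring_speed_alt (s : String) (t : String) (max_cost : Int) : Int :=
  let pr := (List.range t.toList.length).foldl
    (fun (st : List Int × Int) i =>
      let acc := st.2 + pvCostAt s.toList t.toList i
      (st.1 ++ [acc], acc)) ([0], 0)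
  (List.range s.toList.length).foldl
    (fun (best : Int) (right : Nat) =>
      let need := pr.1.getD (right + 1) 0 - max_cost
      let lo := pvBisect pr.1 need (pr.1.length + 1) 0 pr.1.length
      max best ((right : Int) + 1 - (lo : Int)))
    0

-- ===== PRECONDITION & SPEC =====
-- Pre_ excludes exactly the inputs where A raises IndexError: unequal lengths (the cost
-- comprehension or the main loop indexes out of range) and nonempty s with max_cost < 0
-- (the while-drain runs past the end of all_costs).
def Pre_equal_substring_speed (s : String) (t : String) (max_cost : Int) : Prop :=
  s.toList.length = t.toList.length ∧ (0 ≤ max_cost ∨ s = "")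
instance (s : String) (t : String) (max_cost : Int) : Decidable (Pre_equal_substring_speed s t max_cost) := by
  unfold Pre_equal_substring_speed; infer_instance

def pvWitness_equal_substring_speed : String × String × Int := ("abcd", "bcdz", 6)

def Spec_equal_substring_speed (s : String) (t : String) (max_cost : Int) (out : Int) : Prop := out = equal_substring_speed_alt s t max_cost
instance (s : String) (t : String) (max_cost : Int) (out : Int) : Decidable (Spec_equal_substring_speed s t max_cost out) := by unfold Spec_equal_substring_speed; infer_instance

-- ===== CLAIM (what is proved, stated in full; the proofs are below) =====
def Claim_equal_equal_substring_speed : Prop := ∀ (s : String) (t : String) (max_cost : Int), Dom_equal_substring_speed s t max_cost → Pre_equal_substring_speed s t max_cost → Spec_equal_substring_speed s t max_cost (equal_substring_speed s t max_cost)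

-- ===== LEMMAS AND PROOFS =====

-- prefix cost sum: pvS f k = cost of the first k positions
def pvS (f : Nat → Int) (k : Nat) : Int := ((List.range k).map f).sum

theorem pvS_succ (f : Nat → Int) (k : Nat) : pvS f (k + 1) = pvS f k + f k := by
  simp [pvS, List.range_succ]

theorem pvS_mono (f : Nat → Int) (hf : ∀ i, 0 ≤ f i) {i j : Nat} (h : i ≤ j) :
    pvS f i ≤ pvS f j := by
  induction j with
  | zero =>
    have : i = 0 := by omega
    simp [this]
  | succ j ih =>
    rcases Nat.lt_or_ge i (j + 1) with hlt | hge
    · have := ih (by omega)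
      have := hf j
      rw [pvS_succ]; omega
    · have : i = j + 1 := by omega
      simp [this]

theorem pvGetD_map_range (g : Nat → Int) {i k : Nat} (h : i < k) :
    ((List.range k).map g).getD i 0 = g i := by
  simp [List.getD, h]

-- B's prefix-building fold produces the table of prefix sums
theorem pvPrefix_fold (f : Nat → Int) (k : Nat) :
    (List.range k).foldl (fun (st : List Int × Int) i => (st.1 ++ [st.2 + f i], st.2 + f i)) ([0], 0)
      = ((List.range (k + 1)).map (pvS f), pvS f k) := by
  induction k with
  | zero => simp [pvS]
  | succ k ih =>
    rw [List.range_succ, List.foldl_append, ih]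
    have h1 : List.range (k + 1 + 1) = List.range (k + 1) ++ [k + 1] := List.range_succ
    simp [h1, pvS_succ]

-- binary-search spec: with monotone prefix sums and bracketing invariants, pvBisect finds
-- the least index whose prefix sum reaches `need`
theorem pvBisect_spec (f : Nat → Int) (hf : ∀ i, 0 ≤ f i) (n : Nat) (need : Int) :
    ∀ fuel lo hi, hi - lo < fuel → lo ≤ hi → hi ≤ n + 1 →
    (∀ i, i < lo → pvS f i < need) → (∀ i, hi ≤ i → i ≤ n → need ≤ pvS f i) →
    (∀ i, i < pvBisect ((List.range (n + 1)).map (pvS f)) need fuel lo hi → pvS f i < need) ∧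
    (pvBisect ((List.range (n + 1)).map (pvS f)) need fuel lo hi ≤ n →
      need ≤ pvS f (pvBisect ((List.range (n + 1)).map (pvS f)) need fuel lo hi)) ∧
    pvBisect ((List.range (n + 1)).map (pvS f)) need fuel lo hi ≤ n + 1 := by
  intro fuel
  induction fuel with
  | zero =>
    intro lo hi hd
    omega
  | succ d ih =>
    intro lo hi hd hlh hhi hlow hhigh
    rw [pvBisect]
    by_cases hlt : lo < hi
    · simp only [hlt, if_true]
      have hmid1 : lo ≤ (lo + hi) / 2 := by omega
      have hmid2 : (lo + hi) / 2 < hi := by omega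
      have hmidn : (lo + hi) / 2 < n + 1 := by omega
      rw [pvGetD_map_range (pvS f) hmidn]
      by_cases hc : pvS f ((lo + hi) / 2) < need
      · simp only [hc, if_true]
        exact ih ((lo + hi) / 2 + 1) hi (by omega) (by omega) hhi
          (fun i hi' => lt_of_le_of_lt (pvS_mono f hf (by omega)) hc) hhigh
      · simp only [hc, if_false]
        exact ih lo ((lo + hi) / 2) (by omega) (by omega) (by omega) hlow
          (fun i hi' hin => le_trans (not_lt.mp hc) (pvS_mono f hf hi'))
    · simp only [hlt, if_false]
      exact ⟨hlow, fun hk => hhigh lo (by omega) hk, by omega⟩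

-- drain spec: starting at left L with running cost Q - pvS f L, the while-loop stops at the
-- least L' ≥ L whose prefix sum reaches Q - mc (no IndexError when 0 ≤ mc and Q ≤ pvS f n)
theorem pvDrain_spec (f : Nat → Int) (_hf : ∀ i, 0 ≤ f i) (n : Nat) (mc : Int) (hmc : 0 ≤ mc)
    (Q : Int) (hQ : Q ≤ pvS f n) :
    ∀ fuel L, n - L < fuel → L ≤ n →
    ∃ L', pvDrain mc ((List.range n).map f) fuel L (Q - pvS f L) = (L', Q - pvS f L') ∧
      L ≤ L' ∧ L' ≤ n ∧ Q - mc ≤ pvS f L' ∧ (∀ i, L ≤ i → i < L' → pvS f i < Q - mc) := by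
  intro fuel
  induction fuel with
  | zero =>
    intro L hd
    omega
  | succ d ih =>
    intro L hd hL
    rw [pvDrain]
    by_cases hrc : Q - pvS f L > mc
    · have hSL : pvS f L < Q - mc := by omega
      have hLn : L < n := by
        rcases Nat.lt_or_ge L n with h | h
        · exact h
        · exfalso; have : L = n := by omega
          subst this; omega
      have hget : ((List.range n).map f)[L]? = some (f L) := by
        simp [hLn]
      simp only [hrc, if_true]
      obtain ⟨L', heq, h1, h2, h3, h4⟩ := ih (L + 1) (by omega) (by omega)
      have harg : Q - pvS f L - f L = Q - pvS f (L + 1) := by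
        rw [pvS_succ]; ring
      refine ⟨L', ?_, by omega, h2, h3, fun i hi1 hi2 => ?_⟩
      · split
        · next c hc =>
            rw [hget] at hc
            cases hc
            rw [harg, heq]
        · next hc => rw [hget] at hc; cases hc
      · rcases Nat.lt_or_ge i (L + 1) with h | h
        · have : i = L := by omega
          subst this; exact hSL
        · exact h4 i h hi2
    · simp only [hrc, if_false]
      exact ⟨L, rfl, le_rfl, hL, by omega, by omega⟩

-- main loop invariant: after k steps A's state is (L, M, rc) with rc = pvS k - pvS L,
-- everything strictly below L is infeasible, and M equals B's accumulator
theorem pvMain_fold (f : Nat → Int) (hf : ∀ i, 0 ≤ f i) (n : Nat) (mc : Int) (hmc : 0 ≤ mc) :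
    ∀ k, k ≤ n →
    ∃ L M rc,
      (List.range k).foldl
        (fun (st : Nat × Int × Int) right =>
          let rc := st.2.2 + ((List.range n).map f).getD right 0
          let p := pvDrain mc ((List.range n).map f) (((List.range n).map f).length + 1) st.1 rc
          (p.1, max ((right : Int) - (p.1 : Int) + 1) st.2.1, p.2))
        (0, 0, 0) = (L, M, rc) ∧
      L ≤ n ∧ rc = pvS f k - pvS f L ∧ (∀ i, i < L → pvS f i < pvS f k - mc) ∧
      M = (List.range k).foldl
        (fun (best : Int) (right : Nat) =>
          max best ((right : Int) + 1 -
            (pvBisect ((List.range (n + 1)).map (pvS f)) (((List.range (n + 1)).map (pvS f)).getD (right + 1) 0 - mc) (((List.range (n + 1)).map (pvS f)).length + 1) 0 ((List.range (n + 1)).map (pvS f)).length : Int)))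
        0 := by
  intro k
  induction k with
  | zero =>
    intro _
    exact ⟨0, 0, 0, rfl, by omega, by simp [pvS], by omega, rfl⟩
  | succ k ihk =>
    intro hk
    obtain ⟨L, M, rc, heq, hLn, hrc, hinv, hM⟩ := ihk (by omega)
    rw [List.range_succ, List.foldl_append, heq]
    simp only [List.foldl_cons, List.foldl_nil]
    -- A's step
    have hgetk : ((List.range n).map f).getD k 0 = f k := pvGetD_map_range f (by omega)
    have harg : rc + f k = pvS f (k + 1) - pvS f L := by rw [hrc, pvS_succ]; ring
    have hcslen : ((List.range n).map f).length = n := by simp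
    obtain ⟨L', hdeq, hLL', hL'n, hfeas, hbelow⟩ :=
      pvDrain_spec f hf n mc hmc (pvS f (k + 1)) (pvS_mono f hf hk)
        (((List.range n).map f).length + 1) L (by rw [hcslen]; omega) hLn
    -- B's step
    have hPlen : ((List.range (n + 1)).map (pvS f)).length = n + 1 := by simp
    have hgetk1 : ((List.range (n + 1)).map (pvS f)).getD (k + 1) 0 = pvS f (k + 1) :=
      pvGetD_map_range (pvS f) (by omega)
    obtain ⟨hbB, hfB, hkB⟩ :=
      pvBisect_spec f hf n (pvS f (k + 1) - mc) (n + 1 + 1) 0 (n + 1) (by omega) (by omega) le_rfl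
        (by omega) (by omega)
    set kB := pvBisect ((List.range (n + 1)).map (pvS f)) (pvS f (k + 1) - mc) (n + 1 + 1) 0 (n + 1) with hkBdef
    have hfeas2 : pvS f (k + 1) - mc ≤ pvS f L' := hfeas
    -- uniqueness: L' = kB
    have hLkB : L' = kB := by
      rcases Nat.lt_trichotomy L' kB with h | h | h
      · exact absurd (hbB L' h) (not_lt.mpr hfeas2)
      · exact h
      · exfalso
        have hkBn : kB ≤ n := by omega
        have : pvS f (k + 1) - mc ≤ pvS f kB := hfB hkBn
        rcases Nat.lt_or_ge kB L with h2 | h2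
        · have h3 := hinv kB h2
          have h4 : pvS f k ≤ pvS f (k + 1) := pvS_mono f hf (by omega)
          omega
        · have := hbelow kB h2 h
          omega
    refine ⟨L', max ((k : Int) - (L' : Int) + 1) M, pvS f (k + 1) - pvS f L', ?_, hL'n, rfl, ?_, ?_⟩
    · simp only [hgetk, harg, hdeq]
    · intro i hi
      rcases Nat.lt_or_ge i L with h | h
      · have h3 := hinv i h
        have h4 : pvS f k ≤ pvS f (k + 1) := pvS_mono f hf (by omega)
        omega
      · exact hbelow i h hi
    · rw [List.foldl_append]
      simp only [List.foldl_cons, List.foldl_nil]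
      rw [← hM, hgetk1, hPlen, ← hkBdef, hLkB, max_comm]
      congr 1
      omega

-- the two ports agree for s = "" inside Pre_ (then t = "" too and both loops are empty)
theorem pvEmpty (t : String) (mc : Int) (hlen : ("" : String).toList.length = t.toList.length) :
    equal_substring_speed "" t mc = equal_substring_speed_alt "" t mc := by
  have ht : t.toList.length = 0 := by simpa using hlen.symm
  simp [equal_substring_speed, equal_substring_speed_alt, ht]

theorem pvMain (s t : String) (mc : Int) (hmc : 0 ≤ mc)
    (hlen : s.toList.length = t.toList.length) :
    equal_substring_speed s t mc = equal_substring_speed_alt s t mc := by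
  set f := pvCostAt s.toList t.toList with hf_def
  have hf : ∀ i, 0 ≤ f i := fun i => abs_nonneg _
  set n := t.toList.length with hn
  obtain ⟨L, M, rc, heq, _, _, _, hM⟩ := pvMain_fold f hf n mc hmc n le_rfl
  unfold equal_substring_speed equal_substring_speed_alt
  rw [pvPrefix_fold f n]
  simp only [← hf_def, ← hn, hlen, heq, hM]

-- ===== VERDICT (by name: the statement is the Claim_ definition above) =====
theorem equal_substring_speed_spec : Claim_equal_equal_substring_speed := by
  intro s t mc _ hpre
  unfold Spec_equal_substring_speed
  obtain ⟨hlen, hmc | hemp⟩ := hpre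
  · exact pvMain s t mc hmc hlen
  · subst hemp
    exact pvEmpty t mc hlen
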